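-- pv_equiv track=rewrite | github.com/thealper2/codewars-solutions | 7-kyu/ten_green_bottles.py | ten_green_bottles
-- ===== SOURCE A (Python) =====
-- def ten_green_bottles(n):
--     result = []
--     bottles = ['no', 'one', 'two', 'three', 'four', 'five', 'six', 'seven', 'eight', 'nine', 'ten']
--     for i in range(n, 0, -1):
--         current = bottles[i]
--         next_bottle = bottles[i - 1]
--         line1 = f"{current.capitalize()} green {'bottle' if i == 1 else 'bottles'} hanging on the wall,"
--         result.append(line1)
--         result.append(line1)
--
--         if i == 1:
--             third_line = "If that one green bottle should accidentally fall,"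
--         else:
--             third_line = "And if one green bottle should accidentally fall,"
--
--         result.append(third_line)
--         fourth_line = f"There'll be {next_bottle} green {'bottle' if i - 1 == 1 else 'bottles'} hanging on the wall."
--         result.append(fourth_line)
--         if i > 1:
--             result.append('')
--
--     return '\n'.join(result) + "\n"
-- ===== SOURCE B (Python) =====
-- def ten_green_bottles(n):
--     words = ['no', 'one', 'two', 'three', 'four', 'five', 'six', 'seven',
--              'eight', 'nine', 'ten']
--
--     def wall(i):
--         return (words[i] + " green "
--                 + ('bottle' if i == 1 else 'bottles')
--                 + " hanging on the wall")
--
--     def song(i):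
--         if i <= 0:
--             return "\n"
--         top = wall(i).capitalize() + ","
--         fall = ("If that one green bottle should accidentally fall,"
--                 if i == 1 else
--                 "And if one green bottle should accidentally fall,")
--         verse = top + "\n" + top + "\n" + fall + "\nThere'll be " + wall(i - 1) + "."
--         return verse + ("\n\n" + song(i - 1) if i > 1 else "\n")
--
--     return song(n)
-- ===== Notes on version B (the rewrite author's own statement) =====
-- stated objective: alternative
-- what changed: B replaces A's imperative loop appending individual lines (with a '' sentinel between verses) by a top-down recursion song(i) that returns the whole remaining song, building each verse from a single shared wall(i) template string reused for both the first and the fourth line of adjacent verses.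
import Mathlib
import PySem

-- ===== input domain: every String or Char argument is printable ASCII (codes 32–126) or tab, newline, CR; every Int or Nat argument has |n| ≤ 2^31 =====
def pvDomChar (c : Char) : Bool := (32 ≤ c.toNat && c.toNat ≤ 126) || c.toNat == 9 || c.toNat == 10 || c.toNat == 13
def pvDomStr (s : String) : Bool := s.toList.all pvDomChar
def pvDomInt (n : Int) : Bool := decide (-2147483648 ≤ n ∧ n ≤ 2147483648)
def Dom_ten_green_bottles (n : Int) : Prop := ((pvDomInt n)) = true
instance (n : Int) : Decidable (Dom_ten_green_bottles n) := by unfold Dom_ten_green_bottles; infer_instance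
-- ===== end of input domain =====

set_option maxRecDepth 4000
set_option maxHeartbeats 1000000


-- B replaces A's line-appending loop (with a '' sentinel line between verses) by a
-- top-down recursion returning the remaining song, with one shared wall(i) template
-- string reused for the first and fourth lines of adjacent verses; objective: alternative.

-- str.capitalize(): exact on ASCII strings (first char uppercased, rest lowercased)
def pyCapitalize (s : String) : String :=
  match s.toList with
  | [] => ""
  | c :: rest => String.ofList (c.toUpper :: rest.map Char.toLower)

def tgbBottles : List String :=
  ["no", "one", "two", "three", "four", "five", "six", "seven", "eight", "nine", "ten"]

-- ===== PORT A =====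
def ten_green_bottles (n : Int) : String :=
  -- where Python's bottles[i] would raise IndexError Pre_ excludes the input, so .getD "" is never reached
  let result :=
    (PySem.List.pyRange n 0 (-1)).foldl (fun (result : List String) (i : Int) =>
      let current := (PySem.List.pyGet? tgbBottles i).getD ""
      let next_bottle := (PySem.List.pyGet? tgbBottles (i - 1)).getD ""
      let line1 := pyCapitalize current ++ " green " ++
        (if i == 1 then "bottle" else "bottles") ++ " hanging on the wall,"
      let result := result ++ [line1]
      let result := result ++ [line1]
      let third_line :=
        if i == 1 then "If that one green bottle should accidentally fall,"
        else "And if one green bottle should accidentally fall,"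
      let result := result ++ [third_line]
      let fourth_line := "There'll be " ++ next_bottle ++ " green " ++
        (if i - 1 == 1 then "bottle" else "bottles") ++ " hanging on the wall."
      let result := result ++ [fourth_line]
      if i > 1 then result ++ [""] else result) []
  PySem.Str.join "\n" result ++ "\n"

-- ===== PORT B =====
def tgbWall (i : Int) : String :=
  (PySem.List.pyGet? tgbBottles i).getD "" ++ " green " ++
    (if i == 1 then "bottle" else "bottles") ++ " hanging on the wall"

-- Source B's song(i): structural recursion on a fuel counter (totality guard only;
-- the initial fuel n.toNat always suffices, one unit per recursive call)
def tgbSongAux : Nat → Int → String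
  | 0, _ => "\n"
  | (f + 1), i =>
    if i ≤ 0 then "\n"
    else
      let top := pyCapitalize (tgbWall i) ++ ","
      let fall :=
        if i == 1 then "If that one green bottle should accidentally fall,"
        else "And if one green bottle should accidentally fall,"
      let verse := top ++ "\n" ++ top ++ "\n" ++ fall ++ "\nThere'll be " ++ tgbWall (i - 1) ++ "."
      verse ++ (if i > 1 then "\n\n" ++ tgbSongAux f (i - 1) else "\n")

def ten_green_bottles_alt (n : Int) : String := tgbSongAux n.toNat n

-- ===== PRECONDITION & SPEC =====
-- Pre_ admits exactly the inputs where A returns: for n ≥ 11 A raises IndexError on bottles[i].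
def Pre_ten_green_bottles (n : Int) : Prop := n ≤ 10
instance (n : Int) : Decidable (Pre_ten_green_bottles n) := by unfold Pre_ten_green_bottles; infer_instance
def pvWitness_ten_green_bottles : Int := (7)

def Spec_ten_green_bottles (n : Int) (out : String) : Prop := out = ten_green_bottles_alt n
instance (n : Int) (out : String) : Decidable (Spec_ten_green_bottles n out) := by unfold Spec_ten_green_bottles; infer_instance

-- ===== CLAIM (what is proved, stated in full; the proofs are below) =====
def Claim_equal_ten_green_bottles : Prop := ∀ (n : Int), Dom_ten_green_bottles n → Pre_ten_green_bottles n → Spec_ten_green_bottles n (ten_green_bottles n)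

-- ===== LEMMAS AND PROOFS =====

-- the four lines of verse i, and the verse as one block
def tgbL1 (i : Int) : String :=
  pyCapitalize ((PySem.List.pyGet? tgbBottles i).getD "") ++ " green " ++
    (if i == 1 then "bottle" else "bottles") ++ " hanging on the wall,"
def tgbL3 (i : Int) : String :=
  if i == 1 then "If that one green bottle should accidentally fall,"
  else "And if one green bottle should accidentally fall,"
def tgbL4 (i : Int) : String :=
  "There'll be " ++ (PySem.List.pyGet? tgbBottles (i - 1)).getD "" ++ " green " ++
    (if i - 1 == 1 then "bottle" else "bottles") ++ " hanging on the wall."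
def tgbVerse (i : Int) : List String := [tgbL1 i, tgbL1 i, tgbL3 i, tgbL4 i]
def tgbVstr (i : Int) : String := PySem.Str.join "\n" (tgbVerse i)
-- A's contribution of iteration i to its flat line list
def tgbA (i : Int) : List String := tgbVerse i ++ if i > 1 then [""] else []

lemma tgb_foldA (l : List Int) (acc : List String) :
    l.foldl (fun (result : List String) (i : Int) =>
      let current := (PySem.List.pyGet? tgbBottles i).getD ""
      let next_bottle := (PySem.List.pyGet? tgbBottles (i - 1)).getD ""
      let line1 := pyCapitalize current ++ " green " ++
        (if i == 1 then "bottle" else "bottles") ++ " hanging on the wall,"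
      let result := result ++ [line1]
      let result := result ++ [line1]
      let third_line :=
        if i == 1 then "If that one green bottle should accidentally fall,"
        else "And if one green bottle should accidentally fall,"
      let result := result ++ [third_line]
      let fourth_line := "There'll be " ++ next_bottle ++ " green " ++
        (if i - 1 == 1 then "bottle" else "bottles") ++ " hanging on the wall."
      let result := result ++ [fourth_line]
      if i > 1 then result ++ [""] else result) acc
    = acc ++ l.flatMap tgbA := by
  induction l generalizing acc with
  | nil => simp
  | cons i t ih =>
    simp only [List.foldl_cons, List.flatMap_cons, ih]
    by_cases h : i > 1 <;>
      simp [tgbA, tgbVerse, tgbL1, tgbL3, tgbL4, h, List.append_assoc]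

lemma tgb_join_cons_ne (sep x : String) (xs : List String) (h : xs ≠ []) :
    PySem.Str.join sep (x :: xs) = x ++ sep ++ PySem.Str.join sep xs := by
  cases xs with
  | nil => exact absurd rfl h
  | cons y r =>
    apply String.toList_inj.mp
    simp [PySem.Str.toList_join, PySem.Chars.join_cons_cons]

lemma tgb_join_nil (sep : String) : PySem.Str.join sep [] = "" := by
  apply String.toList_inj.mp
  simp [PySem.Str.toList_join, PySem.Chars.join_nil]

lemma tgb_join_singleton (sep x : String) : PySem.Str.join sep [x] = x := by
  apply String.toList_inj.mp
  simp [PySem.Str.toList_join, PySem.Chars.join_singleton]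

lemma tgb_join_append_ne (sep : String) (xs ys : List String) (hx : xs ≠ []) (hy : ys ≠ []) :
    PySem.Str.join sep (xs ++ ys) = PySem.Str.join sep xs ++ sep ++ PySem.Str.join sep ys := by
  induction xs with
  | nil => exact absurd rfl hx
  | cons x t ih =>
    cases t with
    | nil =>
      simp only [List.singleton_append, tgb_join_singleton]
      exact tgb_join_cons_ne sep x ys hy
    | cons y r =>
      rw [List.cons_append, tgb_join_cons_ne sep x ((y :: r) ++ ys) (by simp),
          ih (by simp), tgb_join_cons_ne sep x (y :: r) (by simp)]
      simp [String.append_assoc]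

-- A's flat '\n'-join with the '' sentinel lines equals the '\n\n'-join of the verse blocks
lemma tgb_key : ∀ n : Int, 1 ≤ n →
    PySem.Str.join "\n" ((PySem.List.pyRange n 0 (-1)).flatMap tgbA)
    = PySem.Str.join "\n\n" ((PySem.List.pyRange n 0 (-1)).map tgbVstr) := by
  intro n hn
  induction n, hn using Int.le_induction with
  | base =>
    rw [PySem.List.pyRange_neg_one_cons (by norm_num),
        PySem.List.pyRange_neg_one_eq_nil (by norm_num)]
    simp only [List.flatMap_cons, List.flatMap_nil, List.map_cons, List.map_nil,
      List.append_nil, tgb_join_singleton]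
    simp [tgbA, tgbVstr]
  | succ m hm ih =>
    rw [PySem.List.pyRange_neg_one_cons (by omega)]
    have hr : PySem.List.pyRange (m + 1 - 1) 0 (-1) = PySem.List.pyRange m 0 (-1) := by
      norm_num
    have hm' : PySem.List.pyRange m 0 (-1) = m :: PySem.List.pyRange (m - 1) 0 (-1) :=
      PySem.List.pyRange_neg_one_cons (by omega)
    rw [hr]
    simp only [List.flatMap_cons, List.map_cons]
    have hA : tgbA (m + 1) = tgbVerse (m + 1) ++ [""] := by
      simp only [tgbA, if_pos (show m + 1 > 1 by omega)]
    have hfm : (PySem.List.pyRange m 0 (-1)).flatMap tgbA ≠ [] := by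
      rw [hm']; simp [tgbA, tgbVerse]
    have hmm : (PySem.List.pyRange m 0 (-1)).map tgbVstr ≠ [] := by
      rw [hm']; simp
    rw [hA, List.append_assoc, List.singleton_append,
        tgb_join_append_ne "\n" (tgbVerse (m+1)) _ (by simp [tgbVerse]) (by simp),
        tgb_join_cons_ne "\n" "" _ hfm,
        tgb_join_cons_ne "\n\n" (tgbVstr (m+1)) _ hmm, ih]
    have h2 : ("" : String) ++ "\n" = "\n" := by simp
    have h4 : ∀ x j : String, x ++ "\n" ++ ("\n" ++ j) = x ++ "\n\n" ++ j := by
      intro x j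
      apply String.toList_inj.mp
      simp
    simp only [tgbVstr]
    rw [h2, h4]

-- B's one verse block (built from the shared wall template) is the '\n'-join of A's four lines
lemma tgb_verse_eq (i : Int) (h1 : 1 ≤ i) (h10 : i ≤ 10) :
    (pyCapitalize (tgbWall i) ++ ",") ++ "\n" ++ (pyCapitalize (tgbWall i) ++ ",") ++ "\n" ++
      tgbL3 i ++ "\nThere'll be " ++ tgbWall (i - 1) ++ "." = tgbVstr i := by
  interval_cases i <;> decide

-- B's recursion computes the '\n\n'-join of the verse blocks, given enough fuel
lemma tgb_song : ∀ (f : Nat) (i : Int), i ≤ 10 → i.toNat ≤ f →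
    tgbSongAux f i
    = PySem.Str.join "\n\n" ((PySem.List.pyRange i 0 (-1)).map tgbVstr) ++ "\n" := by
  intro f
  induction f with
  | zero =>
    intro i _ hf
    rw [PySem.List.pyRange_neg_one_eq_nil (by omega)]
    simp [tgbSongAux, tgb_join_nil]
  | succ f ih =>
    intro i h10 hf
    by_cases h0 : i ≤ 0
    · rw [PySem.List.pyRange_neg_one_eq_nil (by omega)]
      simp [tgbSongAux, h0, tgb_join_nil]
    · have h1 : 1 ≤ i := by omega
      rw [PySem.List.pyRange_neg_one_cons (by omega)]
      simp only [List.map_cons, tgbSongAux, if_neg h0]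
      by_cases hone : i = 1
      · subst hone
        rw [PySem.List.pyRange_neg_one_eq_nil (by norm_num)]
        simp only [List.map_nil, if_neg (show ¬ ((1:Int) > 1) by norm_num), tgb_join_singleton]
        have := tgb_verse_eq 1 (by norm_num) (by norm_num)
        simp only [tgbL3, if_pos (show (1:Int) == 1 from rfl)] at this ⊢
        rw [← this]
      · have hgt : i > 1 := by omega
        have hmm : (PySem.List.pyRange (i - 1) 0 (-1)).map tgbVstr ≠ [] := by
          rw [PySem.List.pyRange_neg_one_cons (show (0:Int) < i - 1 by omega)]; simp
        rw [if_pos hgt, tgb_join_cons_ne "\n\n" _ _ hmm,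
            ih (i - 1) (by omega) (by omega)]
        have := tgb_verse_eq i h1 h10
        simp only [tgbL3, if_neg (show ¬ (i == 1) by simp [hone])] at this ⊢
        rw [← this]
        apply String.toList_inj.mp
        simp

-- ===== VERDICT (by name: the statement is the Claim_ definition above) =====
theorem ten_green_bottles_spec : Claim_equal_ten_green_bottles := by
  intro n _ hpre
  unfold Spec_ten_green_bottles ten_green_bottles ten_green_bottles_alt
  simp only [tgb_foldA, List.nil_append]
  by_cases h : n ≤ 0
  · rw [PySem.List.pyRange_neg_one_eq_nil (by omega)]
    have hz : n.toNat = 0 := by omega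
    rw [hz]
    simp [tgbSongAux, tgb_join_nil]
  · rw [tgb_key n (by omega), tgb_song n.toNat n hpre (le_refl _)]
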